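-- pv_equiv track=rewrite | github.com/seokjeon/juliet-playground | tools/stage/stage01_manifest.py | _match_comments_to_functions
-- ===== SOURCE A (Python) =====
-- def _match_comments_to_functions(
--     spans: list[tuple[int, int, str]],
--     comments: list[tuple[int, str, str]],
-- ) -> list[tuple[int, str, str, str | None]]:
--     spans = sorted(spans, key=lambda x: (x[0], x[1]))
--     comments = sorted(comments, key=lambda x: x[0])
--     matched: list[tuple[int, str, str, str | None]] = []
--     j = 0
--     for line_no, tag, code_text in comments:
--         while j < len(spans) and spans[j][1] < line_no:
--             j += 1
--         function_name: str | None = None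
--         if j < len(spans):
--             start, end, name = spans[j]
--             if start <= line_no <= end:
--                 function_name = name
--         matched.append((line_no, tag, code_text, function_name))
--     return matched
-- ===== SOURCE B (Python) =====
-- def _match_comments_to_functions(
--     spans: list[tuple[int, int, str]],
--     comments: list[tuple[int, str, str]],
-- ) -> list[tuple[int, str, str, str | None]]:
--     spans = sorted(spans, key=lambda x: (x[0], x[1]))
--     matched: list[tuple[int, str, str, str | None]] = []
--     for line_no, tag, code_text in sorted(comments, key=lambda x: x[0]):
--         function_name: str | None = None
--         for start, end, name in spans:
--             if end >= line_no:
--                 if start <= line_no: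
--                     function_name = name
--                 break
--         matched.append((line_no, tag, code_text, function_name))
--     return matched
-- ===== Notes on version B (the rewrite author's own statement) =====
-- stated objective: alternative
-- what changed: Replaces A's stateful monotone two-pointer sweep (a shared index j advanced across comments) with an independent per-comment scan of the sorted spans that stops at the first span whose end >= line_no.
import Mathlib
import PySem

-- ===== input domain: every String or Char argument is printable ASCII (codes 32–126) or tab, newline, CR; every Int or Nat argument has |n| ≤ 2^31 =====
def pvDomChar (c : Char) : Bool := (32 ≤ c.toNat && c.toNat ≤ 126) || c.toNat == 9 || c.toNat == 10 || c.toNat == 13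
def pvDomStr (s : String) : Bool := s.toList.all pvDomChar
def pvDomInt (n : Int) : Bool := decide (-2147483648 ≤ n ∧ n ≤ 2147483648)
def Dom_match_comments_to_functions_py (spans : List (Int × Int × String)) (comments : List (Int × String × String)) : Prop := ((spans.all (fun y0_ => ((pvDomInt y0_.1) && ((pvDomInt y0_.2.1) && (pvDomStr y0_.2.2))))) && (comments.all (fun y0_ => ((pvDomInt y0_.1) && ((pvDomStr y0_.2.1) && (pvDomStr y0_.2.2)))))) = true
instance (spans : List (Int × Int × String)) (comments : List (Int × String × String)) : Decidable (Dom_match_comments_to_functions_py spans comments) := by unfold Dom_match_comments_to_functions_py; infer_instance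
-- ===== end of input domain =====

-- B replaces A's monotone two-pointer sweep with an independent per-comment scan of the
-- sorted spans (first span whose end >= line_no); alternative decomposition, same results.

-- ===== PORT A =====
-- the 'while j < len(spans) and spans[j][1] < line_no: j += 1' loop
def pvAdvance (spans : List (Int × Int × String)) (line : Int) (j : Nat) : Nat :=
  if h : j < spans.length then
    if (spans[j]).2.1 < line then pvAdvance spans line (j + 1) else j
  else j
termination_by spans.length - j

-- the 'for line_no, tag, code_text in comments' loop carrying the pointer j
def pvLoopA (spans : List (Int × Int × String)) (j : Nat) :
    List (Int × String × String) → List (Int × String × String × Option String)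
  | [] => []
  | (lineNo, tag, codeText) :: rest =>
    let j' := pvAdvance spans lineNo j
    let functionName : Option String :=
      if h : j' < spans.length then
        if (spans[j']).1 ≤ lineNo ∧ lineNo ≤ (spans[j']).2.1 then some (spans[j']).2.2 else none
      else none
    (lineNo, tag, codeText, functionName) :: pvLoopA spans j' rest

def match_comments_to_functions_py (spans : List (Int × Int × String)) (comments : List (Int × String × String)) : List (Int × String × String × Option String) :=
  pvLoopA (PySem.List.sorted2 spans (fun x => x.1) (fun x => x.2.1)) 0
    (PySem.List.sorted comments (fun x => x.1))

-- ===== PORT B =====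
-- the inner 'for start, end, name in spans: if end >= line_no: … break' loop
def pvFindFn (spans : List (Int × Int × String)) (lineNo : Int) : Option String :=
  match spans with
  | [] => none
  | (s, e, n) :: rest =>
    if lineNo ≤ e then (if s ≤ lineNo then some n else none)
    else pvFindFn rest lineNo

def pvLoopB (spans : List (Int × Int × String)) :
    List (Int × String × String) → List (Int × String × String × Option String)
  | [] => []
  | (lineNo, tag, codeText) :: rest =>
    (lineNo, tag, codeText, pvFindFn spans lineNo) :: pvLoopB spans rest

def match_comments_to_functions_py_alt (spans : List (Int × Int × String)) (comments : List (Int × String × String)) : List (Int × String × String × Option String) :=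
  pvLoopB (PySem.List.sorted2 spans (fun x => x.1) (fun x => x.2.1))
    (PySem.List.sorted comments (fun x => x.1))

-- ===== PRECONDITION & SPEC =====
def Spec_match_comments_to_functions_py (spans : List (Int × Int × String)) (comments : List (Int × String × String)) (out : List (Int × String × String × Option String)) : Prop := out = match_comments_to_functions_py_alt spans comments
instance (spans : List (Int × Int × String)) (comments : List (Int × String × String)) (out : List (Int × String × String × Option String)) : Decidable (Spec_match_comments_to_functions_py spans comments out) := by unfold Spec_match_comments_to_functions_py; infer_instance

-- ===== CLAIM (what is proved, stated in full; the proofs are below) =====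
def Claim_equal_match_comments_to_functions_py : Prop := ∀ (spans : List (Int × Int × String)) (comments : List (Int × String × String)), Dom_match_comments_to_functions_py spans comments → Spec_match_comments_to_functions_py spans comments (match_comments_to_functions_py spans comments)

-- ===== LEMMAS AND PROOFS =====

theorem pvAdvance_inv (spans : List (Int × Int × String)) (line : Int) (j : Nat)
    (hj : ∀ i (hi : i < spans.length), i < j → (spans[i]).2.1 < line) :
    (∀ i (hi : i < spans.length), i < pvAdvance spans line j → (spans[i]).2.1 < line)
    ∧ (∀ h : pvAdvance spans line j < spans.length,
        line ≤ (spans[pvAdvance spans line j]).2.1) := by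
  fun_induction pvAdvance spans line j with
  | case1 j h hlt ih =>
    exact ih (fun i hi hij => by
      rcases Nat.lt_or_ge i j with hc | hc
      · exact hj i hi hc
      · have : i = j := by omega
        subst this; exact hlt)
  | case2 j h hlt =>
    exact ⟨hj, fun _ => le_of_not_gt hlt⟩
  | case3 j h =>
    exact ⟨hj, fun hc => absurd hc h⟩

theorem pvFindFn_of_inv (lineNo : Int) :
    ∀ (spans : List (Int × Int × String)) (j : Nat),
    (∀ i (hi : i < spans.length), i < j → (spans[i]).2.1 < lineNo) →
    (∀ h : j < spans.length, lineNo ≤ (spans[j]).2.1) →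
    pvFindFn spans lineNo =
      (if h : j < spans.length then
        if (spans[j]).1 ≤ lineNo ∧ lineNo ≤ (spans[j]).2.1 then some (spans[j]).2.2 else none
      else none) := by
  intro spans
  induction spans with
  | nil =>
    intro j _ _
    simp [pvFindFn]
  | cons hd rest ih =>
    obtain ⟨s, e, n⟩ := hd
    intro j hlt hstop
    match j with
    | 0 =>
      have he : lineNo ≤ e := hstop (by simp)
      simp [pvFindFn, he]
    | Nat.succ k =>
      have he : e < lineNo := hlt 0 (by simp) (by omega)
      have : ¬ lineNo ≤ e := by omega
      rw [pvFindFn, if_neg this]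
      rw [ih k
        (fun i hi hik => hlt (i + 1) (by simpa using Nat.succ_lt_succ hi) (by omega))
        (fun h => hstop (by simpa using Nat.succ_lt_succ h))]
      simp

theorem pvLoop_eq (spans : List (Int × Int × String)) :
    ∀ (comments : List (Int × String × String)) (j : Nat),
    comments.Pairwise (fun a b => a.1 ≤ b.1) →
    (∀ i (hi : i < spans.length), i < j → ∀ c ∈ comments, (spans[i]).2.1 < c.1) →
    pvLoopA spans j comments = pvLoopB spans comments := by
  intro comments
  induction comments with
  | nil => intro j _ _; rfl
  | cons c rest ih =>
    obtain ⟨lineNo, tag, codeText⟩ := c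
    intro j hpw hinv
    have hpw' := (List.pairwise_cons.mp hpw)
    have hj : ∀ i (hi : i < spans.length), i < j → (spans[i]).2.1 < lineNo :=
      fun i hi hij => hinv i hi hij (lineNo, tag, codeText) (by simp)
    obtain ⟨hadv, hstop⟩ := pvAdvance_inv spans lineNo j hj
    rw [pvLoopA, pvLoopB]
    refine congrArg₂ _ ?_ ?_
    · simp only [Prod.mk.injEq, true_and]
      exact (pvFindFn_of_inv lineNo spans (pvAdvance spans lineNo j) hadv hstop).symm
    · exact ih (pvAdvance spans lineNo j) hpw'.2
        (fun i hi hij c hc =>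
          lt_of_lt_of_le (hadv i hi hij) (hpw'.1 c hc))

-- ===== VERDICT (by name: the statement is the Claim_ definition above) =====
theorem match_comments_to_functions_py_spec : Claim_equal_match_comments_to_functions_py := by
  intro spans comments _
  unfold Spec_match_comments_to_functions_py match_comments_to_functions_py match_comments_to_functions_py_alt
  exact pvLoop_eq _ _ 0 (PySem.List.sorted_pairwise comments (fun x => x.1))
    (fun i hi hij => by omega)
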